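-- pv_equiv track=rewrite | github.com/Okashanadeem/LearnByFun | Caeser Cipher/caeserCipherDecode.py | reverse_alternating_caesar_shift
-- ===== SOURCE A (Python) =====
-- def reverse_alternating_caesar_shift(text):
--     """Step 5: Reverse alternating Caesar shift and restore uppercase"""
--     result = []
--     letter_position = 0
--     i = 0
--
--     while i < len(text):
--         ch = text[i]
--
--         if ch == '_' and i + 1 < len(text) and text[i + 1].isalpha():
--             # This is an uppercase letter (now lowercase with _)
--             next_ch = text[i + 1]
--
--             # Determine the shift that was used (same pattern as encoder)
--             current_shift = 7 if letter_position % 2 == 0 else 3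
--             letter_position += 1
--
--             # Reverse the shift and convert back to uppercase
--             base = ord('a')
--             original = chr((ord(next_ch) - base - current_shift) % 26 + ord('A'))
--             result.append(original)
--             i += 2  # Skip the next character as we processed it
--         elif ch.isalpha() and ch.islower():
--             # Regular lowercase letter
--             current_shift = 7 if letter_position % 2 == 0 else 3
--             letter_position += 1
--
--             base = ord('a')
--             original = chr((ord(ch) - base - current_shift) % 26 + base)
--             result.append(original)
--             i += 1
--         else:
--             result.append(ch)
--             i += 1
--
--     return ''.join(result)
-- ===== SOURCE B (Python) =====
-- def reverse_alternating_caesar_shift(text):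
--     """Step 5: split the text on '_'; a segment whose first char is alphabetic was an
--     underscore-marked uppercase letter, otherwise the underscore was literal; decode
--     segment bodies as plain lowercase letters, threading the letter position."""
--     segments = text.split('_')
--     out = []
--     pos = 0
--
--     def dec(c, base, p):
--         return chr((ord(c) - ord('a') - (7 if p % 2 == 0 else 3)) % 26 + base)
--
--     for k, seg in enumerate(segments):
--         body = seg
--         if k > 0:
--             if seg and seg[0].isalpha():
--                 out.append(dec(seg[0], ord('A'), pos))
--                 pos += 1
--                 body = seg[1:]
--             else:
--                 out.append('_')
--         for ch in body:
--             if ch.isalpha() and ch.islower():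
--                 out.append(dec(ch, ord('a'), pos))
--                 pos += 1
--             else:
--                 out.append(ch)
--     return ''.join(out)
-- ===== Notes on version B (the rewrite author's own statement) =====
-- stated objective: alternative
-- what changed: Replaces A's index-based while-loop with lookahead (text[i+1]) by splitting the text on the underscore separator and decoding the resulting segment list: each later segment's alphabetic head is a marked uppercase letter, a non-alphabetic (or missing) head means the separator was literal, and segment bodies are decoded as plain lowercase letters.
import Mathlib
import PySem

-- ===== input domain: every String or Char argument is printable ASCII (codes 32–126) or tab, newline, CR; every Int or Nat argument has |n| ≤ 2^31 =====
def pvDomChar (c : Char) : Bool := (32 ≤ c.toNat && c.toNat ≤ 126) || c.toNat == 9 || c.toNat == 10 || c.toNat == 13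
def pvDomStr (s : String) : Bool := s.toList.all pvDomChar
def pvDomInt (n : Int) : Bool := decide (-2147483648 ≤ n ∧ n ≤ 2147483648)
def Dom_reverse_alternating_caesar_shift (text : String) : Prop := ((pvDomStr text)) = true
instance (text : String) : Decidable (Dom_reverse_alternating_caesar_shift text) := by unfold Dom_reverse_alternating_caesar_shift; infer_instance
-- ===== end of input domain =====

-- B replaces A's index-based while-loop with lookahead by splitting the text on '_' and decoding the
-- segment list: an alphabetic segment head is an underscore-marked uppercase letter (objective: alternative).


-- ===== PORT A =====
-- shift used at letter position pos (7 on even positions, 3 on odd)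
def pvShiftA (pos : Nat) : Int := if pos % 2 = 0 then 7 else 3

-- chr((ord(c) - ord('a') - shift) % 26 + base)
def pvDecodeA (c : Char) (pos : Nat) (base : Nat) : Char :=
  Char.ofNat (PySem.Int.mod ((c.toNat : Int) - 97 - pvShiftA pos) 26 + (base : Int)).toNat

-- A's while-loop: one interleaved pass, i advancing by 2 on a '_'+alpha pair
def pvLoopA : List Char → Nat → List Char
  | '_' :: next :: rest, pos =>
    if PySem.Chars.isalpha next then
      pvDecodeA next pos 65 :: pvLoopA rest (pos + 1)
    else
      '_' :: pvLoopA (next :: rest) pos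
  | c :: rest, pos =>
    if PySem.Chars.isalpha c && PySem.Chars.islower c then
      pvDecodeA c pos 97 :: pvLoopA rest (pos + 1)
    else
      c :: pvLoopA rest pos
  | [], _ => []

def reverse_alternating_caesar_shift (text : String) : String :=
  String.ofList (pvLoopA text.toList 0)

-- ===== PORT B =====
-- shift and chr((ord(c) - ord('a') - shift) % 26 + base), as in Source B's dec helper
def pvDecB (c : Char) (base : Nat) (pos : Nat) : Char :=
  Char.ofNat (PySem.Int.mod ((c.toNat : Int) - 97 - (if pos % 2 = 0 then 7 else 3)) 26 + (base : Int)).toNat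

-- text.split('_') (exact hand port of str.split for a single-char separator)
def pvSplitU : List Char → List (List Char)
  | [] => [[]]
  | c :: rest =>
    if c = '_' then [] :: pvSplitU rest
    else
      match pvSplitU rest with
      | h :: t => (c :: h) :: t
      | [] => [[c]]

-- decode a segment body (plain characters), threading the letter position
def pvDecBody : List Char → Nat → List Char × Nat
  | [], pos => ([], pos)
  | c :: cs, pos =>
    if PySem.Chars.isalpha c && PySem.Chars.islower c then
      let (r, p) := pvDecBody cs (pos + 1)
      (pvDecB c 97 pos :: r, p)
    else
      let (r, p) := pvDecBody cs pos
      (c :: r, p)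

-- decode the segments after the first (each preceded by an underscore in the original text)
def pvDecRest : List (List Char) → Nat → List Char
  | [], _ => []
  | seg :: t, pos =>
    match seg with
    | c :: body =>
      if PySem.Chars.isalpha c then
        pvDecB c 65 pos ::
          (let (r, p) := pvDecBody body (pos + 1)
           r ++ pvDecRest t p)
      else
        '_' ::
          (let (r, p) := pvDecBody (c :: body) pos
           r ++ pvDecRest t p)
    | [] => '_' :: pvDecRest t pos

-- decode the whole segment list: the first segment is a plain body
def pvDecSegs : List (List Char) → Nat → List Char
  | [], _ => []
  | seg :: t, pos =>
    let (r, p) := pvDecBody seg pos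
    r ++ pvDecRest t p

def reverse_alternating_caesar_shift_alt (text : String) : String :=
  String.ofList (pvDecSegs (pvSplitU text.toList) 0)

-- ===== PRECONDITION & SPEC =====
def Spec_reverse_alternating_caesar_shift (text : String) (out : String) : Prop := out = reverse_alternating_caesar_shift_alt text
instance (text : String) (out : String) : Decidable (Spec_reverse_alternating_caesar_shift text out) := by unfold Spec_reverse_alternating_caesar_shift; infer_instance

-- ===== CLAIM (what is proved, stated in full; the proofs are below) =====
def Claim_equal_reverse_alternating_caesar_shift : Prop := ∀ (text : String), Dom_reverse_alternating_caesar_shift text → Spec_reverse_alternating_caesar_shift text (reverse_alternating_caesar_shift text)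

-- ===== LEMMAS AND PROOFS =====
theorem pvSplitU_ne_nil (l : List Char) : pvSplitU l ≠ [] := by
  cases l with
  | nil => decide
  | cons c rest =>
    simp only [pvSplitU]
    split
    · simp
    · cases h : pvSplitU rest <;> simp

theorem pvDecSegs_cons (seg : List Char) (t : List (List Char)) (pos : Nat) :
    pvDecSegs (seg :: t) pos = (pvDecBody seg pos).1 ++ pvDecRest t (pvDecBody seg pos).2 := by
  unfold pvDecSegs
  rcases h : pvDecBody seg pos with ⟨r, p⟩
  simp [h]

theorem pvLoopA_pair (c : Char) (rest : List Char) (pos : Nat) :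
    pvLoopA ('_' :: c :: rest) pos =
      if PySem.Chars.isalpha c then pvDecodeA c pos 65 :: pvLoopA rest (pos + 1)
      else '_' :: pvLoopA (c :: rest) pos := by
  rfl

theorem pvLoopA_single (c : Char) (rest : List Char) (pos : Nat) (hc : c ≠ '_') :
    pvLoopA (c :: rest) pos =
      if PySem.Chars.isalpha c && PySem.Chars.islower c then
        pvDecodeA c pos 97 :: pvLoopA rest (pos + 1)
      else c :: pvLoopA rest pos := by
  cases rest with
  | nil => simp [pvLoopA]
  | cons d ds =>
    conv_lhs => rw [pvLoopA.eq_def]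
    split
    · rename_i heq
      injection heq with h1 _
      exact absurd h1 hc
    · rename_i heq
      injection heq with h1 h2
      subst h1; subst h2
      rfl
    · rename_i heq
      exact absurd heq (by simp)

-- main invariant: decoding the split of l equals A's loop on l (left),
-- and decoding the trailing segments of the split of l equals A's loop on '_'::l (right)
theorem pv_main (l : List Char) :
    (∀ pos, pvDecSegs (pvSplitU l) pos = pvLoopA l pos) ∧
    (∀ pos, pvDecRest (pvSplitU l) pos = pvLoopA ('_' :: l) pos) := by
  induction l with
  | nil =>
    refine ⟨fun pos => ?_, fun pos => ?_⟩
    · rfl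
    · show ('_' :: pvDecRest [] pos) = pvLoopA ['_'] pos
      have h1 : pvLoopA ['_'] pos = ['_'] := by
        have : (PySem.Chars.isalpha '_' && PySem.Chars.islower '_') = false := by decide
        simp [pvLoopA, this]
      rw [h1]
      rfl
  | cons c rest ih =>
    obtain ⟨ihP, ihQ⟩ := ih
    by_cases hc : c = '_'
    · subst hc
      have hsplit : pvSplitU ('_' :: rest) = [] :: pvSplitU rest := by simp [pvSplitU]
      refine ⟨fun pos => ?_, fun pos => ?_⟩
      · rw [hsplit]
        show pvDecRest (pvSplitU rest) pos = _
        exact ihQ pos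
      · rw [hsplit]
        show '_' :: pvDecRest (pvSplitU rest) pos = _
        rw [pvLoopA_pair]
        have : PySem.Chars.isalpha '_' = false := by decide
        rw [this]
        simp only [Bool.false_eq_true, if_false]
        rw [ihQ]
    · obtain ⟨h, t, hsplit⟩ : ∃ h t, pvSplitU rest = h :: t := by
        cases hs : pvSplitU rest with
        | nil => exact absurd hs (pvSplitU_ne_nil rest)
        | cons h t => exact ⟨h, t, rfl⟩
      have hsplitC : pvSplitU (c :: rest) = (c :: h) :: t := by
        simp [pvSplitU, hc, hsplit]
      have hP : ∀ pos, pvDecSegs (pvSplitU (c :: rest)) pos = pvLoopA (c :: rest) pos := by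
        intro pos
        rw [hsplitC, pvDecSegs_cons, pvLoopA_single _ _ _ hc]
        by_cases hl : (PySem.Chars.isalpha c && PySem.Chars.islower c) = true
        · simp only [pvDecBody, hl, if_true, List.cons_append]
          rw [← pvDecSegs_cons, ← hsplit, ihP]
          rfl
        · simp only [pvDecBody, hl, if_false, Bool.false_eq_true, List.cons_append]
          rw [← pvDecSegs_cons, ← hsplit, ihP]
      refine ⟨hP, fun pos => ?_⟩
      rw [hsplitC, pvLoopA_pair]
      by_cases ha : PySem.Chars.isalpha c = true
      · have hd : pvDecRest ((c :: h) :: t) pos =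
            pvDecB c 65 pos :: ((pvDecBody h (pos + 1)).1 ++ pvDecRest t (pvDecBody h (pos + 1)).2) := by
          simp only [pvDecRest, ha, if_true]
        rw [hd, ← pvDecSegs_cons, ← hsplit, ihP, ha, if_pos rfl]
        rfl
      · have hd : pvDecRest ((c :: h) :: t) pos =
            '_' :: ((pvDecBody (c :: h) pos).1 ++ pvDecRest t (pvDecBody (c :: h) pos).2) := by
          simp only [pvDecRest, ha, if_false, Bool.false_eq_true]
        rw [hd, ← pvDecSegs_cons, ← hsplitC, hP, if_neg ha]

-- ===== VERDICT (by name: the statement is the Claim_ definition above) =====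
theorem reverse_alternating_caesar_shift_spec : Claim_equal_reverse_alternating_caesar_shift := by
  intro text _
  unfold Spec_reverse_alternating_caesar_shift reverse_alternating_caesar_shift reverse_alternating_caesar_shift_alt
  rw [(pv_main text.toList).1]
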